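-- pv_equiv track=rewrite | github.com/mrzhenya/plex-plugins | localmetadata/code/infofileutils.py | parseMultiLineValue
-- ===== SOURCE A (Python) =====
-- def parseMultiLineValue(lines):
--   mergedValue = ''
--   for line in lines:
--     line = line.strip()
--     if not line and not mergedValue:
--       # Skipping leading empty lines.
--       continue
--     if not line:
--       mergedValue += '\n'
--     elif mergedValue:
--       mergedValue += ' '
--     mergedValue += line
--   return mergedValue
-- ===== SOURCE B (Python) =====
-- def parseMultiLineValue(lines):
--   stripped = [line.strip() for line in lines]
--   i = 0
--   while i < len(stripped) and not stripped[i]: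
--     i += 1
--   rest = stripped[i:]
--   if not rest:
--     return ''
--   return rest[0] + ''.join('\n' if s == '' else ' ' + s for s in rest[1:])
-- ===== Notes on version B (the rewrite author's own statement) =====
-- stated objective: idiomatic
-- what changed: Replaces the stateful accumulator loop (separator chosen from accumulator emptiness) by three passes: strip all lines, drop the leading empty ones, then join the remainder with separators computed from each element itself.
import Mathlib
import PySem

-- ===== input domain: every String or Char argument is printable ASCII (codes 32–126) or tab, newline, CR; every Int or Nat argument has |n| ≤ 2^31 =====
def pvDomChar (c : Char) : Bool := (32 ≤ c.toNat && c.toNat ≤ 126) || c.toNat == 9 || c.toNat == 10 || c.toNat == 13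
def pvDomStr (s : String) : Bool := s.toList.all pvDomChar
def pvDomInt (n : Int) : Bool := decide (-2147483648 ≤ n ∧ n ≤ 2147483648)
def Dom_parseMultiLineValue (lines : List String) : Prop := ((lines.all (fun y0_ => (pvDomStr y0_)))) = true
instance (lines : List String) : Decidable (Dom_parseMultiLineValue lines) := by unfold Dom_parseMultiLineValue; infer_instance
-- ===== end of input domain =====

-- B strips all lines, drops the leading empty ones, then joins the rest with per-element
-- separators; objective: idiomatic decomposition (same cost as A, no speed claim).

-- ===== PORT A =====
-- the body of A's for-loop, step for step
def parseMultiLineValueStep (mergedValue line0 : String) : String :=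
  let line := PySem.Str.strip line0
  if line == "" && mergedValue == "" then
    mergedValue       -- skipping leading empty lines
  else
    let m :=
      if line == "" then mergedValue ++ "\n"
      else if mergedValue != "" then mergedValue ++ " "
      else mergedValue
    m ++ line

def parseMultiLineValue (lines : List String) : String :=
  lines.foldl parseMultiLineValueStep ""

-- ===== PORT B =====
def parseMultiLineValue_alt (lines : List String) : String :=
  let stripped := lines.map PySem.Str.strip
  let rest := stripped.dropWhile (fun s => s == "")
  match rest with
  | [] => ""
  | h :: t => h ++ PySem.Str.join "" (t.map (fun s => if s == "" then "\n" else " " ++ s))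

-- ===== PRECONDITION & SPEC =====
def Spec_parseMultiLineValue (lines : List String) (out : String) : Prop := out = parseMultiLineValue_alt lines
instance (lines : List String) (out : String) : Decidable (Spec_parseMultiLineValue lines out) := by unfold Spec_parseMultiLineValue; infer_instance

-- ===== CLAIM (what is proved, stated in full; the proofs are below) =====
def Claim_equal_parseMultiLineValue : Prop := ∀ (lines : List String), Dom_parseMultiLineValue lines → Spec_parseMultiLineValue lines (parseMultiLineValue lines)

-- ===== LEMMAS AND PROOFS =====

theorem pv_append_ne_empty (a b : String) (h : b ≠ "") : a ++ b ≠ "" := by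
  intro hc
  apply h
  have h2 := congrArg String.toList hc
  simp [String.toList_append] at h2
  exact h2.2

theorem pv_join_empty_cons (x : String) (xs : List String) :
    PySem.Str.join "" (x :: xs) = x ++ PySem.Str.join "" xs := by
  apply String.ext
  simp [PySem.Str.toList_join, PySem.Chars.join, String.toList_append, List.intercalate]
  cases xs <;> simp

theorem pv_join_empty_nil : PySem.Str.join "" ([] : List String) = "" := by
  apply String.ext
  simp [PySem.Str.toList_join, PySem.Chars.join, List.intercalate]

theorem pv_step_skip (acc line0 : String) (h1 : PySem.Str.strip line0 = "") (h2 : acc = "") :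
    parseMultiLineValueStep acc line0 = acc := by
  simp [parseMultiLineValueStep, h1, h2]

theorem pv_step_newline (acc line0 : String) (h1 : PySem.Str.strip line0 = "") (h2 : acc ≠ "") :
    parseMultiLineValueStep acc line0 = acc ++ "\n" := by
  simp [parseMultiLineValueStep, h1, h2]

theorem pv_step_word_empty (acc line0 : String) (h1 : PySem.Str.strip line0 ≠ "") (h2 : acc = "") :
    parseMultiLineValueStep acc line0 = PySem.Str.strip line0 := by
  simp [parseMultiLineValueStep, h1, h2]

theorem pv_step_word (acc line0 : String) (h1 : PySem.Str.strip line0 ≠ "") (h2 : acc ≠ "") :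
    parseMultiLineValueStep acc line0 = acc ++ (" " ++ PySem.Str.strip line0) := by
  simp [parseMultiLineValueStep, h1, h2, String.append_assoc]

theorem pv_foldl_of_ne (ls : List String) (acc : String) (h : acc ≠ "") :
    List.foldl parseMultiLineValueStep acc ls
    = acc ++ PySem.Str.join ""
        ((ls.map PySem.Str.strip).map (fun s => if s == "" then "\n" else " " ++ s)) := by
  induction ls generalizing acc with
  | nil => simp [pv_join_empty_nil]
  | cons line0 ls ih =>
    simp only [List.foldl_cons, List.map_cons, pv_join_empty_cons]
    by_cases hl : PySem.Str.strip line0 = ""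
    · rw [pv_step_newline acc line0 hl h,
        ih (acc ++ "\n") (pv_append_ne_empty _ _ (by decide))]
      simp [hl, String.append_assoc]
    · rw [pv_step_word acc line0 hl h,
        ih _ (pv_append_ne_empty _ _ (pv_append_ne_empty _ _ hl))]
      simp [hl, String.append_assoc]

theorem pv_main (ls : List String) : parseMultiLineValue ls = parseMultiLineValue_alt ls := by
  induction ls with
  | nil => rfl
  | cons line0 ls ih =>
    unfold parseMultiLineValue parseMultiLineValue_alt
    by_cases hl : PySem.Str.strip line0 = ""
    · simp only [List.foldl_cons, List.map_cons, List.dropWhile_cons]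
      rw [pv_step_skip "" line0 hl rfl]
      simpa [parseMultiLineValue, parseMultiLineValue_alt, hl] using ih
    · simp only [List.foldl_cons, List.map_cons, List.dropWhile_cons]
      rw [pv_step_word_empty "" line0 hl rfl,
        pv_foldl_of_ne ls (PySem.Str.strip line0) hl]
      simp [hl]

-- ===== VERDICT (by name: the statement is the Claim_ definition above) =====
theorem parseMultiLineValue_spec : Claim_equal_parseMultiLineValue := by
  intro lines _
  unfold Spec_parseMultiLineValue
  exact pv_main lines
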